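-- pv_equiv track=rewrite | github.com/mitkeng/QRxVision | run_qrxvision.py | filter_max_value_duplicates
-- ===== SOURCE A (Python) =====
-- from collections import Counter
--
-- def filter_max_value_duplicates(data):
--     max_values = {}
--     for item in data:
--         string_key = item[1]
--         current_value = item[2]
--
--         if string_key not in max_values or current_value > max_values[string_key][2]:
--             max_values[string_key] = item
--
--     string_counts = Counter(item[1] for item in data)
--     result = [item for string_key, item in max_values.items() if string_counts[string_key] > 1]
--
--     return result
-- ===== SOURCE B (Python) =====
-- def filter_max_value_duplicates(data):
--     groups = {}
--     for item in data:
--         groups.setdefault(item[1], []).append(item)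
--     return [max(g, key=lambda it: it[2]) for g in groups.values() if len(g) > 1]
-- ===== Notes on version B (the rewrite author's own statement) =====
-- stated objective: simpler
-- what changed: Replaces A's running-max dict plus a separate Counter pass and key-indexed filter with a single grouping pass (dict of per-key item lists) followed by one max() per group of size > 1.
import Mathlib
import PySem

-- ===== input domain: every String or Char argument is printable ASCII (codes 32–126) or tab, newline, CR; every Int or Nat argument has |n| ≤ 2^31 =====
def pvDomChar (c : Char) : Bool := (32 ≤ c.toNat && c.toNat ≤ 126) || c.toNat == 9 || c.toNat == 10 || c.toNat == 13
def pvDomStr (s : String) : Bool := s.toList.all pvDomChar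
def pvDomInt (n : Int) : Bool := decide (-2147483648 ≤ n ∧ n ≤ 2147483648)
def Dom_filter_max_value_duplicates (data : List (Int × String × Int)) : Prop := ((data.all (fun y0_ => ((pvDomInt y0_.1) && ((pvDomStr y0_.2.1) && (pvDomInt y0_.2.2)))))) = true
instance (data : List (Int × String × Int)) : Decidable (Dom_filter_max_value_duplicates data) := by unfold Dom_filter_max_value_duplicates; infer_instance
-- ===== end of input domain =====

-- B replaces A's running-max dict plus Counter pass plus key-indexed filter by one grouping pass
-- and a max() per group of size > 1 (objective: simpler; same asymptotic cost).

-- ===== PORT A =====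
def filter_max_value_duplicates (data : List (Int × String × Int)) : List (Int × String × Int) :=
  let maxValues := data.foldl (fun d item =>
    match d.get? item.2.1 with
    | none => d.insert item.2.1 item
    | some prev => if prev.2.2 < item.2.2 then d.insert item.2.1 item else d)
    PySem.Dict.empty
  let stringCounts := PySem.Dict.counter (data.map (fun item => item.2.1))
  (maxValues.items.filter (fun p => stringCounts.getD p.1 0 > 1)).map (fun p => p.2)

-- ===== PORT B =====
def filter_max_value_duplicates_alt (data : List (Int × String × Int)) : List (Int × String × Int) :=
  let groups := data.foldl (fun d item => d.modify item.2.1 [] (fun g => g ++ [item])) PySem.Dict.empty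
  ((groups.values).filter (fun g => g.length > 1)).filterMap (fun g => PySem.List.max? g (fun it => it.2.2))

-- ===== PRECONDITION & SPEC =====
def Spec_filter_max_value_duplicates (data : List (Int × String × Int)) (out : List (Int × String × Int)) : Prop := out = filter_max_value_duplicates_alt data
instance (data : List (Int × String × Int)) (out : List (Int × String × Int)) : Decidable (Spec_filter_max_value_duplicates data out) := by unfold Spec_filter_max_value_duplicates; infer_instance

-- ===== CLAIM (what is proved, stated in full; the proofs are below) =====
def Claim_equal_filter_max_value_duplicates : Prop := ∀ (data : List (Int × String × Int)), Dom_filter_max_value_duplicates data → Spec_filter_max_value_duplicates data (filter_max_value_duplicates data)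

-- ===== LEMMAS AND PROOFS =====

-- names for the two loop bodies (definitionally equal to the lambdas in the ports)
def pvStepA (d : PySem.Dict String (Int × String × Int)) (item : Int × String × Int) : PySem.Dict String (Int × String × Int) :=
  match d.get? item.2.1 with
  | none => d.insert item.2.1 item
  | some prev => if prev.2.2 < item.2.2 then d.insert item.2.1 item else d

def pvStepG (d : PySem.Dict String (List (Int × String × Int))) (item : Int × String × Int) : PySem.Dict String (List (Int × String × Int)) :=
  d.modify item.2.1 [] (fun g => g ++ [item])

-- views of the two dicts' entries into a common shape: A's running max equals the
-- first maximal element (max?) of B's group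
def pvF (p : String × (Int × String × Int)) : String × Option (Int × String × Int) := (p.1, some p.2)
def pvM (p : String × List (Int × String × Int)) : String × Option (Int × String × Int) :=
  (p.1, PySem.List.max? p.2 (fun it => it.2.2))

lemma pv_get?_rel_aux (LA : List (String × (Int × String × Int))) :
    ∀ (LG : List (String × List (Int × String × Int))), LA.map pvF = LG.map pvM →
    ∀ k, (PySem.Dict.mk LA).get? k =
      ((PySem.Dict.mk LG).get? k).bind (fun g => PySem.List.max? g (fun it => it.2.2)) := by
  induction LA with
  | nil =>
    intro LG h k
    cases LG with
    | nil => simp [PySem.Dict.get?]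
    | cons b LG' => simp at h
  | cons a LA' ih =>
    intro LG h k
    cases LG with
    | nil => simp at h
    | cons b LG' =>
      rw [List.map_cons, List.map_cons] at h
      injection h with h1 h2
      obtain ⟨ka, va⟩ := a
      obtain ⟨kb, gb⟩ := b
      simp only [pvF, pvM, Prod.mk.injEq] at h1
      obtain ⟨hk, hv⟩ := h1
      rw [PySem.Dict.get?_mk_cons, PySem.Dict.get?_mk_cons, hk]
      by_cases hkb : (kb == k) = true
      · simp [hkb, ← hv]
      · simp [hkb, ih LG' h2 k]

lemma pv_get?_rel (dA : PySem.Dict String (Int × String × Int))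
    (dG : PySem.Dict String (List (Int × String × Int)))
    (h : dA.items.map pvF = dG.items.map pvM) (k : String) :
    dA.get? k = (dG.get? k).bind (fun g => PySem.List.max? g (fun it => it.2.2)) := by
  obtain ⟨LA⟩ := dA
  obtain ⟨LG⟩ := dG
  exact pv_get?_rel_aux LA LG h k

lemma pv_step_rel (dA : PySem.Dict String (Int × String × Int))
    (dG : PySem.Dict String (List (Int × String × Int)))
    (h : dA.items.map pvF = dG.items.map pvM) (hA : dA.keys.Nodup) (hG : dG.keys.Nodup)
    (it : Int × String × Int) :
    (pvStepA dA it).items.map pvF = (pvStepG dG it).items.map pvM ∧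
      (pvStepA dA it).keys.Nodup ∧ (pvStepG dG it).keys.Nodup := by
  have hrel := pv_get?_rel dA dG h it.2.1
  rcases hc : dA.get? it.2.1 with _ | m
  · -- key unseen so far on both sides
    rw [hc] at hrel
    have hg : dG.get? it.2.1 = none := by
      rcases hgc : dG.get? it.2.1 with _ | g
      · rfl
      · rw [hgc] at hrel
        simp only [Option.bind_some] at hrel
        have hgnil : g = [] := (PySem.List.max?_eq_none_iff g _).mp hrel.symm
        subst hgnil
        have hmem := PySem.Dict.mem_items_of_get?_eq_some dG hgc
        have hmm : pvM (it.2.1, []) ∈ dG.items.map pvM := List.mem_map_of_mem hmem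
        rw [← h] at hmm
        obtain ⟨p, hp, hpe⟩ := List.mem_map.mp hmm
        simp [pvF, pvM, PySem.List.max?, Prod.ext_iff] at hpe
    have hcontA : dA.contains it.2.1 = false := by
      rw [PySem.Dict.contains_eq_isSome_get?, hc]; rfl
    have hcontG : dG.contains it.2.1 = false := by
      rw [PySem.Dict.contains_eq_isSome_get?, hg]; rfl
    have hsA : pvStepA dA it = dA.insert it.2.1 it := by simp [pvStepA, hc]
    have hsG : pvStepG dG it = dG.insert it.2.1 [it] := by
      simp [pvStepG, PySem.Dict.modify, PySem.Dict.getD_eq_get?_getD, hg]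
    rw [hsA, hsG]
    refine ⟨?_, PySem.Dict.nodup_keys_insert _ _ _ hA, PySem.Dict.nodup_keys_insert _ _ _ hG⟩
    rw [PySem.Dict.items_insert_of_not_contains _ _ hcontA,
        PySem.Dict.items_insert_of_not_contains _ _ hcontG,
        List.map_append, List.map_append, h]
    simp [pvF, pvM, PySem.List.max?]
  · -- key present: A holds the first maximal element m of B's group g
    rw [hc] at hrel
    rcases hgc : dG.get? it.2.1 with _ | g
    · rw [hgc] at hrel; simp at hrel
    rw [hgc] at hrel
    simp only [Option.bind_some] at hrel
    have hmax : PySem.List.max? g (fun x => x.2.2) = some m := hrel.symm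
    have hcontA : dA.contains it.2.1 = true := by
      rw [PySem.Dict.contains_eq_isSome_get?, hc]; rfl
    have hcontG : dG.contains it.2.1 = true := by
      rw [PySem.Dict.contains_eq_isSome_get?, hgc]; rfl
    have hsG : pvStepG dG it = dG.insert it.2.1 (g ++ [it]) := by
      simp [pvStepG, PySem.Dict.modify, PySem.Dict.getD_eq_get?_getD, hgc]
    have hmax2 : PySem.List.max? (g ++ [it]) (fun x => x.2.2) =
        if m.2.2 < it.2.2 then some it else some m := by
      simp only [PySem.List.max?] at hmax ⊢
      rw [List.foldl_append, hmax]
      rfl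
    rw [hsG, ]
    by_cases hlt : m.2.2 < it.2.2
    · have hsA : pvStepA dA it = dA.insert it.2.1 it := by simp [pvStepA, hc, hlt]
      rw [hsA]
      refine ⟨?_, PySem.Dict.nodup_keys_insert _ _ _ hA, PySem.Dict.nodup_keys_insert _ _ _ hG⟩
      rw [PySem.Dict.items_insert_of_contains _ _ hcontA,
          PySem.Dict.items_insert_of_contains _ _ hcontG,
          List.map_map, List.map_map]
      have lhs : dA.items.map (pvF ∘ fun p => if (p.1 == it.2.1) = true then (it.2.1, it) else p)
          = (dA.items.map pvF).map
              (fun q => if (q.1 == it.2.1) = true then (it.2.1, some it) else q) := by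
        rw [List.map_map]
        apply List.map_congr_left
        intro p _
        by_cases hpk : (p.1 == it.2.1) = true
        · simp [Function.comp, hpk, pvF]
        · simp [Function.comp, hpk, pvF]
      have rhs : dG.items.map (pvM ∘ fun p => if (p.1 == it.2.1) = true then (it.2.1, g ++ [it]) else p)
          = (dG.items.map pvM).map
              (fun q => if (q.1 == it.2.1) = true then (it.2.1, some it) else q) := by
        rw [List.map_map]
        apply List.map_congr_left
        intro p _
        by_cases hpk : (p.1 == it.2.1) = true
        · simp [Function.comp, hpk, pvM, hmax2, hlt]
        · simp [Function.comp, hpk, pvM]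
      rw [lhs, rhs, h]
    · have hsA : pvStepA dA it = dA := by simp [pvStepA, hc, hlt]
      rw [hsA]
      refine ⟨?_, hA, PySem.Dict.nodup_keys_insert _ _ _ hG⟩
      rw [PySem.Dict.items_insert_of_contains _ _ hcontG, List.map_map]
      rw [h]
      apply List.map_congr_left
      intro p hp
      by_cases hpk : (p.1 == it.2.1) = true
      · have hpk' : p.1 = it.2.1 := by simpa using hpk
        have hget : dG.get? p.1 = some p.2 :=
          PySem.Dict.get?_of_mem_items dG hp hG
        rw [hpk', hgc] at hget
        have hpg : p.2 = g := by injection hget.symm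
        simp [Function.comp, pvM, hmax2, hlt, hpk', hpg, hmax]
      · simp [Function.comp, hpk]

lemma pv_fold_inv (l : List (Int × String × Int)) (dA : PySem.Dict String (Int × String × Int))
    (dG : PySem.Dict String (List (Int × String × Int)))
    (h : dA.items.map pvF = dG.items.map pvM) (hA : dA.keys.Nodup) (hG : dG.keys.Nodup) :
    (l.foldl pvStepA dA).items.map pvF = (l.foldl pvStepG dG).items.map pvM ∧
      (l.foldl pvStepA dA).keys.Nodup ∧ (l.foldl pvStepG dG).keys.Nodup := by
  induction l generalizing dA dG with
  | nil => exact ⟨h, hA, hG⟩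
  | cons x t ih =>
    obtain ⟨h', hA', hG'⟩ := pv_step_rel dA dG h hA hG x
    exact ih _ _ h' hA' hG'

-- the grouping fold's groups are the key-filtered sublists of data
lemma pv_groups_getD (data : List (Int × String × Int)) (c : String) :
    (data.foldl pvStepG PySem.Dict.empty).getD c [] = data.filter (fun it => it.2.1 == c) := by
  have h1 : data.foldl pvStepG PySem.Dict.empty
      = (data.map (fun it => (it.2.1, it))).foldl
          (fun d p => d.modify p.1 [] (fun x => x ++ [p.2])) PySem.Dict.empty := by
    rw [List.foldl_map]; rfl
  rw [h1, PySem.Dict.getD_foldl_modify_append]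
  simp [List.filter_map, Function.comp_def, List.map_map]

-- aligned filtering/reduction of the two item lists
lemma pv_final (cnt : String → Int) (LA : List (String × (Int × String × Int))) :
    ∀ (LG : List (String × List (Int × String × Int))),
    LA.map pvF = LG.map pvM →
    (∀ p ∈ LG, cnt p.1 = (p.2.length : Int)) →
    (LA.filter (fun p => cnt p.1 > 1)).map (fun p => p.2) =
      (LG.filter (fun p => p.2.length > 1)).filterMap
        (fun p => PySem.List.max? p.2 (fun it => it.2.2)) := by
  induction LA with
  | nil =>
    intro LG h _
    cases LG with
    | nil => simp
    | cons b LG' => simp at h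
  | cons a LA' ih =>
    intro LG h hlen
    cases LG with
    | nil => simp at h
    | cons b LG' =>
      rw [List.map_cons, List.map_cons] at h
      injection h with h1 h2
      obtain ⟨ka, va⟩ := a
      obtain ⟨kb, gb⟩ := b
      simp only [pvF, pvM, Prod.mk.injEq] at h1
      obtain ⟨hk, hv⟩ := h1
      have hcnt : cnt kb = (gb.length : Int) := hlen (kb, gb) (List.mem_cons_self)
      have htail := ih LG' h2 (fun p hp => hlen p (List.mem_cons_of_mem _ hp))
      rw [List.filter_cons, List.filter_cons]
      by_cases hgt : gb.length > 1
      · have hgt' : cnt ka > 1 := by rw [hk, hcnt]; exact_mod_cast hgt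
        simp only [hgt, hgt', decide_true, if_true]
        rw [List.map_cons, List.filterMap_cons, ← hv]
        rw [htail]
      · have hgt' : ¬ (cnt ka > 1) := by rw [hk, hcnt]; exact_mod_cast hgt
        simp only [hgt, hgt', decide_false]
        exact htail

-- ===== VERDICT (by name: the statement is the Claim_ definition above) =====
theorem filter_max_value_duplicates_spec : Claim_equal_filter_max_value_duplicates := by
  intro data _
  show filter_max_value_duplicates data = filter_max_value_duplicates_alt data
  have eA : filter_max_value_duplicates data
      = ((data.foldl pvStepA PySem.Dict.empty).items.filter
          (fun p => (PySem.Dict.counter (data.map (fun item => item.2.1))).getD p.1 0 > 1)).map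
          (fun p => p.2) := rfl
  have eB : filter_max_value_duplicates_alt data
      = (((data.foldl pvStepG PySem.Dict.empty).items.map (fun p => p.2)).filter
          (fun g => g.length > 1)).filterMap (fun g => PySem.List.max? g (fun it => it.2.2)) := rfl
  rw [eA, eB, List.filter_map, List.filterMap_map]
  obtain ⟨hrel, hAnd, hGnd⟩ :=
    pv_fold_inv data PySem.Dict.empty PySem.Dict.empty rfl
      PySem.Dict.nodup_keys_empty PySem.Dict.nodup_keys_empty
  refine pv_final (fun k => (PySem.Dict.counter (data.map (fun item => item.2.1))).getD k 0)
    _ _ hrel ?_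
  intro p hp
  show (PySem.Dict.counter (data.map (fun item => item.2.1))).getD p.1 0 = (p.2.length : Int)
  have hgd : (data.foldl pvStepG PySem.Dict.empty).getD p.1 [] = p.2 :=
    PySem.Dict.getD_of_mem_items _ hp hGnd []
  have hp2 : p.2 = data.filter (fun it => it.2.1 == p.1) := by
    rw [← hgd, pv_groups_getD]
  rw [PySem.Dict.getD_counter, hp2]
  simp [List.count_eq_countP, List.countP_eq_length_filter, List.filter_map, Function.comp_def]
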